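-- pv_equiv track=rewrite | github.com/Tomas229/advent_of_code_2020 | day12/day12.py | move_aux
-- ===== SOURCE A (Python) =====
-- def move_aux(action, num, face):
--     x = 0
--     y = 0
--     if action == "N":
--         y += num
--     elif action == "S":
--         y -= num
--     elif action == "E":
--         x += num
--     elif action == "W":
--         x -= num
--     elif action == "F":
--         ret = move_aux(degreesToCardinal(face), num, face)
--         x += ret[0]
--         y += ret[1]
--     elif action == "L":
--         face = (face + num) % 360
--     elif action == "R":
--         ret = move_aux("L", -num, face)
--         face = ret[2]
--
--     return x, y, face
--
-- def degreesToCardinal(degrees):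
--     if degrees == 0:
--         return "E"
--     elif degrees == 90:
--         return "N"
--     elif degrees == 180:
--         return "W"
--     elif degrees == 270:
--         return "S"
-- ===== SOURCE B (Python) =====
-- # Arithmetic reformulation: every translating action is an angle; the
-- # displacement is num * (cos t, sin t) read off an integer cosine table,
-- # so N/S/E/W and F share one formula instead of separate branches.
-- _ANGLE = {"E": 0, "N": 90, "W": 180, "S": 270}
--
-- def _icos(t):
--     return (1, 0, -1, 0)[(t // 90) % 4]
--
-- def move_aux(action, num, face):
--     if action in ("L", "R"):
--         return 0, 0, ((face + num) if action == "L" else (face - num)) % 360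
--     if action == "F":
--         t = face if face in (0, 90, 180, 270) else None
--     else:
--         t = _ANGLE.get(action)
--     if t is None:
--         return 0, 0, face
--     return num * _icos(t), num * _icos(90 - t), face
-- ===== Notes on version B (the rewrite author's own statement) =====
-- stated objective: alternative
-- what changed: Replaces A's per-direction recursive branch chain (F re-entering move_aux with the cardinal, R re-entering with L and negated num) by an arithmetic formulation: each translating action maps to an angle and the displacement is num*(cos t, sin t) read off one integer cosine table, so N/S/E/W and F share a single formula; L/R are direct (face±num)%360.
import Mathlib
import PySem

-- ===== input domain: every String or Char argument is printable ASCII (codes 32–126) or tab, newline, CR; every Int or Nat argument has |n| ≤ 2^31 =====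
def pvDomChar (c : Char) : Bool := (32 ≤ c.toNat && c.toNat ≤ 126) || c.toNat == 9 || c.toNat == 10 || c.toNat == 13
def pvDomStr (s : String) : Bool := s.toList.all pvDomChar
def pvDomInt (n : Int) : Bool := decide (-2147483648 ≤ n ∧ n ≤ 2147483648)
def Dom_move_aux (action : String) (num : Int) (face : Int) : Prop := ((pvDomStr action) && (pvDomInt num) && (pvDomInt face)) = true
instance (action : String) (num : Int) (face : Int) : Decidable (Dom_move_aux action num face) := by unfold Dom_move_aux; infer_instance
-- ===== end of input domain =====

-- B replaces A's recursive branch chain by an arithmetic angle/cosine-table formulation (objective: alternative).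

-- ===== PORT A =====
-- degreesToCardinal returns Optional[str] (None off the four cardinals)
def degreesToCardinal (degrees : Int) : Option String :=
  if degrees = 0 then some "E"
  else if degrees = 90 then some "N"
  else if degrees = 180 then some "W"
  else if degrees = 270 then some "S"
  else none

-- A's recursion, with the action as Option String (the F branch may pass None);
-- the F and R branches recurse once into a non-F/non-R action.
def move_aux_rec (action : Option String) (num : Int) (face : Int) : Int × Int × Int :=
  if action = some "N" then (0, 0 + num, face)
  else if action = some "S" then (0, 0 - num, face)
  else if action = some "E" then (0 + num, 0, face)
  else if action = some "W" then (0 - num, 0, face)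
  else if action = some "F" then
    let ret := move_aux_rec (degreesToCardinal face) num face
    (0 + ret.1, 0 + ret.2.1, face)
  else if action = some "L" then (0, 0, PySem.Int.mod (face + num) 360)
  else if action = some "R" then
    let ret := move_aux_rec (some "L") (-num) face
    (0, 0, ret.2.2)
  else (0, 0, face)
termination_by (if action = some "F" ∨ action = some "R" then 1 else 0 : Nat)
decreasing_by
  · simp only [degreesToCardinal]
    split_ifs <;> simp_all
  · simp_all

def move_aux (action : String) (num : Int) (face : Int) : Int × Int × Int :=
  move_aux_rec (some action) num face

-- ===== PORT B =====
def pvAngle : PySem.Dict String Int :=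
  PySem.Dict.ofList [("E", 0), ("N", 90), ("W", 180), ("S", 270)]

-- integer cosine on multiples of 90°: (1,0,-1,0)[(t // 90) % 4]
-- the index is always in 0..3 (mod 4 of a positive modulus), so .getD 0 never fires
def pvIcos (t : Int) : Int :=
  (PySem.List.pyGet? ([1, 0, -1, 0] : List Int)
    (PySem.Int.mod (PySem.Int.floordiv t 90) 4)).getD 0

def move_aux_alt (action : String) (num : Int) (face : Int) : Int × Int × Int :=
  if action = "L" ∨ action = "R" then
    (0, 0, PySem.Int.mod (if action = "L" then face + num else face - num) 360)
  else
    let t : Option Int :=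
      if action = "F" then
        (if face = 0 ∨ face = 90 ∨ face = 180 ∨ face = 270 then some face else none)
      else pvAngle.get? action
    match t with
    | none => (0, 0, face)
    | some t => (num * pvIcos t, num * pvIcos (90 - t), face)

-- ===== PRECONDITION & SPEC =====
def Spec_move_aux (action : String) (num : Int) (face : Int) (out : Int × Int × Int) : Prop := out = move_aux_alt action num face
instance (action : String) (num : Int) (face : Int) (out : Int × Int × Int) : Decidable (Spec_move_aux action num face out) := by unfold Spec_move_aux; infer_instance

-- ===== CLAIM (what is proved, stated in full; the proofs are below) =====
def Claim_equal_move_aux : Prop := ∀ (action : String) (num : Int) (face : Int), Dom_move_aux action num face → Spec_move_aux action num face (move_aux action num face)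

-- ===== LEMMAS AND PROOFS =====
theorem pvAngle_items : pvAngle = PySem.Dict.mk [("E", 0), ("N", 90), ("W", 180), ("S", 270)] := by decide

theorem move_aux_eq (action : String) (num face : Int) :
    move_aux action num face = move_aux_alt action num face := by
  by_cases hN : action = "N"
  · subst hN
    simp [move_aux, move_aux_rec, move_aux_alt, pvAngle_items, PySem.Dict.get?, pvIcos]
  by_cases hS : action = "S"
  · subst hS
    simp [move_aux, move_aux_rec, move_aux_alt, pvAngle_items, PySem.Dict.get?, pvIcos]
  by_cases hE : action = "E"
  · subst hE
    simp [move_aux, move_aux_rec, move_aux_alt, pvAngle_items, PySem.Dict.get?, pvIcos]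
  by_cases hW : action = "W"
  · subst hW
    simp [move_aux, move_aux_rec, move_aux_alt, pvAngle_items, PySem.Dict.get?, pvIcos]
  by_cases hF : action = "F"
  · subst hF
    by_cases h0 : face = 0
    · subst h0
      simp [move_aux, move_aux_rec, move_aux_alt, degreesToCardinal, pvIcos]
    by_cases h90 : face = 90
    · subst h90
      simp [move_aux, move_aux_rec, move_aux_alt, degreesToCardinal, pvIcos]
    by_cases h180 : face = 180
    · subst h180
      simp [move_aux, move_aux_rec, move_aux_alt, degreesToCardinal, pvIcos]
    by_cases h270 : face = 270
    · subst h270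
      simp [move_aux, move_aux_rec, move_aux_alt, degreesToCardinal, pvIcos]
    · rw [move_aux, move_aux_rec]
      simp [move_aux_rec, move_aux_alt, degreesToCardinal, h0, h90, h180, h270]
  by_cases hL : action = "L"
  · subst hL
    simp [move_aux, move_aux_rec, move_aux_alt]
  by_cases hR : action = "R"
  · subst hR
    rw [move_aux, move_aux_rec]
    simp [move_aux_rec, move_aux_alt, sub_eq_add_neg]
  · rw [move_aux, move_aux_rec]
    simp [move_aux_alt, pvAngle_items, PySem.Dict.get?, beq_iff_eq,
      Ne.symm hN, Ne.symm hS, Ne.symm hE, Ne.symm hW, hN, hS, hE, hW, hF, hL, hR]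

-- ===== VERDICT (by name: the statement is the Claim_ definition above) =====
theorem move_aux_spec : Claim_equal_move_aux := by
  intro action num face _
  unfold Spec_move_aux
  exact move_aux_eq action num face
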